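-- pv_equiv track=rewrite | github.com/toebgen/exercises | crawl_file_names.py | transform_to_file_size_dict
-- ===== SOURCE A (Python) =====
-- def transform_to_file_size_dict(duplicate_file_names_dict):
--     file_size_dict = {}
--     for filename, the_list in duplicate_file_names_dict.items():
--         for entry in the_list:
--             full_path, filesize = entry
--             if filesize not in file_size_dict:
--                 file_size_dict[filesize] = [full_path]
--             else:
--                 file_size_dict[filesize].append(full_path)
--     return file_size_dict
-- ===== SOURCE B (Python) =====
-- def transform_to_file_size_dict(duplicate_file_names_dict):
--     # Different decomposition: flatten once, dedup the sizes in first-occurrence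
--     # order, then build each group by a filtering pass per distinct size.
--     pairs = [entry for the_list in duplicate_file_names_dict.values()
--              for entry in the_list]
--     sizes = list(dict.fromkeys(size for _, size in pairs))
--     return {s: [path for path, size in pairs if size == s] for s in sizes}
-- ===== Notes on version B (the rewrite author's own statement) =====
-- stated objective: alternative
-- what changed: Replaces the incremental dict-accumulation loop (insert-or-append per entry) with flatten once, ordered dedup of the sizes, then one filtering pass per distinct size building each group wholesale.
import Mathlib
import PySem

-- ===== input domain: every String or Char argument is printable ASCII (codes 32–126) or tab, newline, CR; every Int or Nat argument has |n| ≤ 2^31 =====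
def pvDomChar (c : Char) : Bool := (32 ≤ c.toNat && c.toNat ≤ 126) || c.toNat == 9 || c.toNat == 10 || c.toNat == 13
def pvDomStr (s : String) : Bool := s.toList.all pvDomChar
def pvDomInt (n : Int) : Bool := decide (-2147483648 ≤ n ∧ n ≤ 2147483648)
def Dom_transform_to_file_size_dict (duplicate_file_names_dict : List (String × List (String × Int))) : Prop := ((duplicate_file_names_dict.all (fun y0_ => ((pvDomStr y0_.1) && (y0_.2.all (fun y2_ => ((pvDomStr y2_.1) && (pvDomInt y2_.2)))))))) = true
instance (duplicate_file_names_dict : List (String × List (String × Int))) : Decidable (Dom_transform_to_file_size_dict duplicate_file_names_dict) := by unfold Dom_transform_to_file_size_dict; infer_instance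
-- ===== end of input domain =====

-- ===== PORT A =====
-- A: dict accumulation — for each entry insert a fresh singleton group or append to the existing one.
def transform_to_file_size_dict (duplicate_file_names_dict : List (String × List (String × Int))) : List (Int × List String) :=
  (duplicate_file_names_dict.foldl
    (fun file_size_dict kv =>
      kv.2.foldl
        (fun file_size_dict entry =>
          let full_path := entry.1
          let filesize := entry.2
          if file_size_dict.contains filesize = false then
            file_size_dict.insert filesize [full_path]
          else
            file_size_dict.modify filesize [] (fun l => l ++ [full_path]))
        file_size_dict)
    PySem.Dict.empty).items

-- ===== PORT B =====
-- B: flatten once, dedup sizes in first-occurrence order, build each group by a filter pass.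
def transform_to_file_size_dict_alt (duplicate_file_names_dict : List (String × List (String × Int))) : List (Int × List String) :=
  let pairs := duplicate_file_names_dict.flatMap (fun kv => kv.2)
  let sizes := PySem.List.dedup (pairs.map (fun pr => pr.2))
  sizes.map (fun s => (s, (pairs.filter (fun pr => pr.2 == s)).map (fun pr => pr.1)))

-- ===== PRECONDITION & SPEC =====
def Spec_transform_to_file_size_dict (duplicate_file_names_dict : List (String × List (String × Int))) (out : List (Int × List String)) : Prop := out = transform_to_file_size_dict_alt duplicate_file_names_dict
instance (duplicate_file_names_dict : List (String × List (String × Int))) (out : List (Int × List String)) : Decidable (Spec_transform_to_file_size_dict duplicate_file_names_dict out) := by unfold Spec_transform_to_file_size_dict; infer_instance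

-- ===== CLAIM (what is proved, stated in full; the proofs are below) =====
def Claim_equal_transform_to_file_size_dict : Prop := ∀ (duplicate_file_names_dict : List (String × List (String × Int))), Dom_transform_to_file_size_dict duplicate_file_names_dict → Spec_transform_to_file_size_dict duplicate_file_names_dict (transform_to_file_size_dict duplicate_file_names_dict)

-- ===== LEMMAS AND PROOFS =====

-- step of A's inner loop, named for the proofs
def pvStep (d : PySem.Dict Int (List String)) (entry : String × Int) : PySem.Dict Int (List String) :=
  if d.contains entry.2 = false then d.insert entry.2 [entry.1]
  else d.modify entry.2 [] (fun l => l ++ [entry.1])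

theorem pvStep_eq_modify (d : PySem.Dict Int (List String)) (e : String × Int) :
    pvStep d e = d.modify e.2 [] (fun l => l ++ [e.1]) := by
  by_cases h : d.contains e.2
  · simp [pvStep, h]
  · have h' : d.contains e.2 = false := by simpa using h
    simp [pvStep, h', PySem.Dict.modify, PySem.Dict.getD_of_not_contains d [] h']

theorem pvFoldl_flatten (l : List (String × List (String × Int)))
    (d : PySem.Dict Int (List String)) :
    l.foldl (fun fsd kv => kv.2.foldl
        (fun fsd entry =>
          let full_path := entry.1
          let filesize := entry.2
          if fsd.contains filesize = false then fsd.insert filesize [full_path]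
          else fsd.modify filesize [] (fun s => s ++ [full_path])) fsd) d
      = (l.flatMap (fun kv => kv.2)).foldl pvStep d := by
  induction l generalizing d with
  | nil => rfl
  | cons hd tl ih =>
    simp only [List.foldl_cons, List.flatMap_cons, List.foldl_append, ih]
    rfl

theorem pvFoldl_step_eq_modify (ps : List (String × Int)) (d : PySem.Dict Int (List String)) :
    ps.foldl pvStep d
      = (ps.map Prod.swap).foldl (fun d p => d.modify p.1 [] (fun l => l ++ [p.2])) d := by
  rw [List.foldl_map]
  apply PySem.List.foldl_congr_mem
  intro d e _
  exact pvStep_eq_modify d e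

-- ===== VERDICT (by name: the statement is the Claim_ definition above) =====
theorem transform_to_file_size_dict_spec : Claim_equal_transform_to_file_size_dict := by
  intro l _
  unfold Spec_transform_to_file_size_dict transform_to_file_size_dict transform_to_file_size_dict_alt
  dsimp only
  rw [pvFoldl_flatten]
  set ps := l.flatMap (fun kv => kv.2) with hps
  rw [pvFoldl_step_eq_modify]
  have hnd : ((ps.map Prod.swap).foldl (fun d p => d.modify p.1 [] (fun l => l ++ [p.2])) PySem.Dict.empty).keys.Nodup := by
    have := PySem.Dict.nodup_keys_foldl_modify_key (ps.map Prod.swap) (fun p => p.1) []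
      (fun _ p l => l ++ [p.2]) PySem.Dict.empty (by simp [PySem.Dict.keys_empty])
    simpa using this
  rw [PySem.Dict.items_eq_map_keys _ hnd []]
  have hkeys : ((ps.map Prod.swap).foldl (fun d p => d.modify p.1 [] (fun l => l ++ [p.2])) PySem.Dict.empty).keys
      = PySem.Set.ofList (ps.map (fun pr => pr.2)) := by
    have := PySem.Dict.keys_foldl_modify_key (ps.map Prod.swap) (fun p => p.1) []
      (fun _ p l => l ++ [p.2]) PySem.Dict.empty
    simpa [List.map_map, Function.comp, Prod.swap, PySem.Set.update_nil_left] using this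
  rw [hkeys, PySem.List.dedup_eq_ofList]
  apply List.map_congr_left
  intro k _
  have hget := PySem.Dict.getD_foldl_modify_append (ps.map Prod.swap) PySem.Dict.empty k
  rw [hget]
  simp [List.filter_map, List.map_map, Function.comp_def]
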